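-- pv_equiv track=rewrite | github.com/Niteshneal/Python_Beginner-Expert_Projects | 15.1 MaxDifference - Part 2.py | maxi_indexes
-- ===== SOURCE A (Python) =====
-- def maxi_indexes(arr):
--     n = len(arr)
--     x = [0 for _ in range(n)]
--     y = [0 for _ in range(n)]
--     x[0] = arr[0]
--
--     if arr is None or n == 0:
--         return 0
--
--     for i in range(1, n):
--         x[i] = y[i - 1] + arr[i]
--         y[i] = max(y[i - 1], x[i - 1])
--
--     return max(x[-1], y[-1])
-- ===== SOURCE B (Python) =====
-- def _merge(L, R):
--     # Combine adjacent segments: forbid using both L's last and R's first.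
--     L00, L01, L10, L11 = L
--     R00, R01, R10, R11 = R
--     return (max(L00 + R10, L01 + R00),
--             max(L00 + R11, L01 + R01),
--             max(L10 + R10, L11 + R00),
--             max(L10 + R11, L11 + R01))
--
--
-- def maxi_indexes(arr):
--     # Divide and conquer: summarize each segment by four values m[p][q] =
--     # best sum of non-adjacent elements where the first element may be used
--     # iff p and the last may be used iff q; merge halves, answer = m[1][1].
--     if not arr:
--         return 0
--     def solve(lo, hi):
--         if hi - lo == 1:
--             return (0, 0, 0, max(arr[lo], 0))
--         mid = (lo + hi) // 2
--         return _merge(solve(lo, mid), solve(mid, hi))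
--     return solve(0, len(arr))[3]
-- ===== Notes on version B (the rewrite author's own statement) =====
-- stated objective: alternative
-- what changed: Replaces A's left-to-right two-array DP with a divide-and-conquer that summarizes each half by a 2x2 table (best non-adjacent sum indexed by whether the first/last element may be used) and merges the halves.
import Mathlib
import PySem

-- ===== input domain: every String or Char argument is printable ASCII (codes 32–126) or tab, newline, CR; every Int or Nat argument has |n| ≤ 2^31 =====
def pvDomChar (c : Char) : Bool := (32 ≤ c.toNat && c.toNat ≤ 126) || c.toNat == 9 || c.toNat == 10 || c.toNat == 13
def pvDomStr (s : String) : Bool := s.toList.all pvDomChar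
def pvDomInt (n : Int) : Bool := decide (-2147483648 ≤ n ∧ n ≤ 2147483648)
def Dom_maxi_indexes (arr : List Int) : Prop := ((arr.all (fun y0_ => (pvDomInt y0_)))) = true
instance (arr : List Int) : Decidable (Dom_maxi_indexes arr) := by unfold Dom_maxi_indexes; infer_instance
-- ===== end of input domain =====

-- B replaces A's left-to-right two-array DP with a divide-and-conquer over segment
-- summaries (objective: alternative). Equivalence is about return values; A raises
-- IndexError on the empty list, which Pre_ excludes (B returns 0 there).

-- ===== PORT A =====
-- Literal port of A: builds zero arrays x, y of length n, writes x[0] = arr[0]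
-- (the write raises IndexError when n = 0, hence Pre_ below; in-range reads/writes
-- are exact via getD/set since all indices 0..n-1 are in range under Pre_).
def maxi_indexes (arr : List Int) : Int :=
  let n := arr.length
  let x : List Int := List.replicate n 0
  let y : List Int := List.replicate n 0
  let x := x.set 0 ((PySem.List.pyGet? arr 0).getD 0)
  let s := (PySem.List.pyRange 1 (n : Int) 1).foldl
    (fun (st : List Int × List Int) (i : Int) =>
      let k := i.toNat
      let x' := st.1.set k (st.2.getD (k - 1) 0 + arr.getD k 0)
      let y' := st.2.set k (max (st.2.getD (k - 1) 0) (st.1.getD (k - 1) 0))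
      (x', y')) (x, y)
  max (s.1.getD (n - 1) 0) (s.2.getD (n - 1) 0)

-- ===== PORT B =====
-- Literal port of B: a segment is summarized by the quadruple (m00, m01, m10, m11),
-- m[p][q] = best non-adjacent sum where the first element may be used iff p and the
-- last iff q; pvMerge is Source B's _merge, pvSolve is Source B's solve (splitting at the
-- midpoint: (lo+hi)//2 - lo = (hi-lo)//2, so take/drop at length/2 is the same split).
structure Quad where
  m00 : Int
  m01 : Int
  m10 : Int
  m11 : Int
deriving DecidableEq, Repr

def pvMerge (L R : Quad) : Quad :=
  ⟨max (L.m00 + R.m10) (L.m01 + R.m00),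
   max (L.m00 + R.m11) (L.m01 + R.m01),
   max (L.m10 + R.m10) (L.m11 + R.m00),
   max (L.m10 + R.m11) (L.m11 + R.m01)⟩

def pvSolve : List Int → Quad
  | [] => ⟨0, 0, 0, 0⟩   -- never reached from a nonempty list (both halves stay nonempty)
  | [v] => ⟨0, 0, 0, max v 0⟩
  | v :: w :: rest =>
    pvMerge (pvSolve ((v :: w :: rest).take ((v :: w :: rest).length / 2)))
            (pvSolve ((v :: w :: rest).drop ((v :: w :: rest).length / 2)))
termination_by l => l.length
decreasing_by
  all_goals simp only [List.length_take, List.length_drop, List.length_cons]; omega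

def maxi_indexes_alt (arr : List Int) : Int :=
  if arr = [] then 0 else (pvSolve arr).m11

-- ===== PRECONDITION & SPEC =====
-- Pre_ excludes exactly the empty list, on which A raises IndexError.
def Pre_maxi_indexes (arr : List Int) : Prop := arr ≠ []
instance (arr : List Int) : Decidable (Pre_maxi_indexes arr) := by unfold Pre_maxi_indexes; infer_instance
def pvWitness_maxi_indexes : List Int := [3, -1, 4, -1, 5]

def Spec_maxi_indexes (arr : List Int) (out : Int) : Prop := out = maxi_indexes_alt arr
instance (arr : List Int) (out : Int) : Decidable (Spec_maxi_indexes arr out) := by unfold Spec_maxi_indexes; infer_instance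

-- ===== CLAIM (what is proved, stated in full; the proofs are below) =====
def Claim_equal_maxi_indexes : Prop := ∀ (arr : List Int), Dom_maxi_indexes arr → Pre_maxi_indexes arr → Spec_maxi_indexes arr (maxi_indexes arr)

-- ===== LEMMAS AND PROOFS =====

-- The mathematical DP A computes cell by cell: pvXY arr k = (x[k], y[k]).
def pvXY (arr : List Int) : Nat → Int × Int
  | 0 => (arr.getD 0 0, 0)
  | k + 1 => ((pvXY arr k).2 + arr.getD (k + 1) 0, max (pvXY arr k).2 (pvXY arr k).1)

-- A's loop body (as in the port).
def pvStepA (arr : List Int) (st : List Int × List Int) (i : Int) : List Int × List Int :=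
  let k := i.toNat
  let x' := st.1.set k (st.2.getD (k - 1) 0 + arr.getD k 0)
  let y' := st.2.set k (max (st.2.getD (k - 1) 0) (st.1.getD (k - 1) 0))
  (x', y')

def pvInitA (arr : List Int) : List Int × List Int :=
  ((List.replicate arr.length 0).set 0 ((PySem.List.pyGet? arr 0).getD 0),
   List.replicate arr.length 0)

-- Invariant for A's fold: after processing range(1, m), the lengths are unchanged and
-- the cells at index m-1 hold pvXY arr (m-1).
theorem pvA_inv (arr : List Int) (h : arr ≠ []) :
    ∀ m : Nat, 1 ≤ m → m ≤ arr.length →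
      let s := (PySem.List.pyRange 1 (m : Int) 1).foldl (pvStepA arr) (pvInitA arr)
      s.1.length = arr.length ∧ s.2.length = arr.length ∧
      s.1.getD (m - 1) 0 = (pvXY arr (m - 1)).1 ∧ s.2.getD (m - 1) 0 = (pvXY arr (m - 1)).2 := by
  intro m
  induction m with
  | zero => intro h1; omega
  | succ m ih =>
    intro _ hm
    by_cases hm1 : 1 ≤ m
    · -- split off the last index m
      have hsplit : PySem.List.pyRange 1 ((m + 1 : Nat) : Int) 1
          = PySem.List.pyRange 1 (m : Int) 1 ++ [(m : Int)] := by
        push_cast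
        exact PySem.List.pyRange_one_succ_right (by exact_mod_cast hm1)
      obtain ⟨hx, hy, hgx, hgy⟩ := ih hm1 (by omega)
      simp only [hsplit, List.foldl_append, List.foldl_cons, List.foldl_nil]
      set s := (PySem.List.pyRange 1 (m : Int) 1).foldl (pvStepA arr) (pvInitA arr) with hs
      have hk : ((m : Int)).toNat = m := Int.toNat_natCast m
      have hmlt : m < arr.length := by omega
      constructor
      · simp [pvStepA, hk, hx]
      constructor
      · simp [pvStepA, hk, hy]
      · -- cells at index m of the new state
        have hm1' : m + 1 - 1 = m := by omega
        rw [hm1']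
        have hxset : (s.1.set m ((s.2.getD (m - 1) 0) + arr.getD m 0)).getD m 0
            = s.2.getD (m - 1) 0 + arr.getD m 0 := by
          rw [List.getD_eq_getElem?_getD, List.getElem?_set_self (by omega)]; rfl
        have hyset : (s.2.set m (max (s.2.getD (m - 1) 0) (s.1.getD (m - 1) 0))).getD m 0
            = max (s.2.getD (m - 1) 0) (s.1.getD (m - 1) 0) := by
          rw [List.getD_eq_getElem?_getD, List.getElem?_set_self (by omega)]; rfl
        simp only [pvStepA, hk]
        rw [hxset, hyset, hgx, hgy]
        rcases Nat.exists_eq_succ_of_ne_zero (by omega : m ≠ 0) with ⟨j, rfl⟩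
        simp [pvXY, max_comm]
    · -- m = 0, so m + 1 = 1: the range is empty, the state is the initial one
      have hm0 : m = 0 := by omega
      subst hm0
      have : PySem.List.pyRange 1 ((1 : Nat) : Int) 1 = [] := by
        exact PySem.List.pyRange_one_eq_nil (by norm_num)
      rw [this]
      simp only [List.foldl_nil]
      rcases arr with _ | ⟨a, rest⟩
      · exact absurd rfl h
      · refine ⟨by simp [pvInitA], by simp [pvInitA], ?_, ?_⟩
        · simp [pvInitA, pvXY, PySem.List.pyGet?, PySem.List.pyIdx?, List.replicate_succ]
        · simp [pvInitA, pvXY]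

-- A computes max (x[n-1]) (y[n-1]).
theorem pvA_eq (arr : List Int) (h : arr ≠ []) :
    maxi_indexes arr
      = max (pvXY arr (arr.length - 1)).1 (pvXY arr (arr.length - 1)).2 := by
  have h1 : 1 ≤ arr.length := List.length_pos_iff.mpr h
  have := pvA_inv arr h arr.length h1 le_rfl
  obtain ⟨_, _, hgx, hgy⟩ := this
  show max _ _ = _
  rw [show ((PySem.List.pyRange 1 (arr.length : Int) 1).foldl
        (fun (st : List Int × List Int) (i : Int) =>
          let k := i.toNat
          let x' := st.1.set k (st.2.getD (k - 1) 0 + arr.getD k 0)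
          let y' := st.2.set k (max (st.2.getD (k - 1) 0) (st.1.getD (k - 1) 0))
          (x', y'))
        (((List.replicate arr.length 0).set 0 ((PySem.List.pyGet? arr 0).getD 0)),
          List.replicate arr.length 0))
      = (PySem.List.pyRange 1 (arr.length : Int) 1).foldl (pvStepA arr) (pvInitA arr)
      from rfl]
  rw [hgx, hgy]

-- B-side characterization: pvT is pvSolve's value computed by peeling one element.
def pvT : List Int → Quad
  | [] => ⟨0, 0, 0, 0⟩
  | [v] => ⟨0, 0, 0, max v 0⟩
  | v :: w :: rest => pvMerge ⟨0, 0, 0, max v 0⟩ (pvT (w :: rest))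

theorem pvMerge_assoc (A B C : Quad) :
    pvMerge (pvMerge A B) C = pvMerge A (pvMerge B C) := by
  cases A; cases B; cases C
  simp only [pvMerge, Quad.mk.injEq]
  refine ⟨?_, ?_, ?_, ?_⟩ <;> omega

theorem pvT_append (L R : List Int) (hL : L ≠ []) (hR : R ≠ []) :
    pvT (L ++ R) = pvMerge (pvT L) (pvT R) := by
  induction L with
  | nil => exact absurd rfl hL
  | cons v L' ih =>
    rcases L' with _ | ⟨w, rest⟩
    · rcases R with _ | ⟨r, R'⟩
      · exact absurd rfl hR
      · rfl
    · have := ih (by simp)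
      show pvMerge ⟨0, 0, 0, max v 0⟩ (pvT ((w :: rest) ++ R)) = _
      rw [this, ← pvMerge_assoc]
      rfl

theorem pvSolve_eq_pvT (l : List Int) (h : l ≠ []) : pvSolve l = pvT l := by
  induction hn : l.length using Nat.strong_induction_on generalizing l with
  | _ n ih =>
    rcases l with _ | ⟨v, l'⟩
    · exact absurd rfl h
    rcases l' with _ | ⟨w, rest⟩
    · rw [pvSolve]; rfl
    have hlen : (v :: w :: rest).length ≥ 2 := by simp
    have htake : (v :: w :: rest).take ((v :: w :: rest).length / 2) ≠ [] := by
      intro hc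
      rw [List.take_eq_nil_iff] at hc
      rcases hc with hc | hc
      · simp only [List.length_cons] at hc; omega
      · exact List.cons_ne_nil _ _ hc
    have hdropne : (v :: w :: rest).drop ((v :: w :: rest).length / 2) ≠ [] := by
      intro hc
      rw [List.drop_eq_nil_iff] at hc
      simp only [List.length_cons] at hc; omega
    have h1 : ((v :: w :: rest).take ((v :: w :: rest).length / 2)).length < n := by
      simp only [List.length_take, List.length_cons] at *; omega
    have h2 : ((v :: w :: rest).drop ((v :: w :: rest).length / 2)).length < n := by
      simp only [List.length_drop, List.length_cons] at *; omega
    rw [pvSolve]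
    rw [ih _ h1 _ htake rfl, ih _ h2 _ hdropne rfl,
      ← pvT_append _ _ htake hdropne, List.take_append_drop]

-- pvXY only looks at indices ≤ k, hence is stable under appending on the right.
theorem pvXY_append (l : List Int) (v : Int) (k : Nat) (hk : k < l.length) :
    pvXY (l ++ [v]) k = pvXY l k := by
  have hg : ∀ j, j < l.length → (l ++ [v]).getD j 0 = l.getD j 0 := by
    intro j hj
    rw [List.getD_eq_getElem?_getD, List.getD_eq_getElem?_getD,
      List.getElem?_append_left hj]
  induction k with
  | zero => simp only [pvXY]; rw [hg 0 hk]
  | succ k ihk =>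
    simp only [pvXY]
    rw [ihk (by omega), hg (k + 1) hk]

-- The left-to-right invariant: pvT's bottom row equals A's DP values.
theorem pvT_inv (l : List Int) (h : l ≠ []) :
    (pvT l).m10 = (pvXY l (l.length - 1)).2 ∧
    (pvT l).m11 = max (pvXY l (l.length - 1)).1 (pvXY l (l.length - 1)).2 := by
  induction l using List.reverseRecOn with
  | nil => exact absurd rfl h
  | append_singleton l v ih =>
    rcases l with _ | ⟨a, l'⟩
    · constructor
      · rfl
      · simp [pvT, pvXY]
    · have hne : (a :: l') ≠ [] := by simp
      obtain ⟨h10, h11⟩ := ih hne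
      rw [pvT_append _ [v] hne (by simp)]
      have hmlt : (a :: l').length - 1 < (a :: l').length := by simp
      have hlen2 : ((a :: l') ++ [v]).length - 1 = ((a :: l').length - 1) + 1 := by
        simp
      have hstab : pvXY ((a :: l') ++ [v]) ((a :: l').length - 1)
          = pvXY (a :: l') ((a :: l').length - 1) := pvXY_append _ _ _ hmlt
      have hget : ((a :: l') ++ [v]).getD (((a :: l').length - 1) + 1) 0 = v := by
        have hmeq : ((a :: l').length - 1) + 1 = (a :: l').length := by simp
        rw [List.getD_eq_getElem?_getD, hmeq,
          List.getElem?_append_right (le_refl _)]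
        simp
      rw [hlen2]
      simp only [pvXY]
      rw [hstab, hget]
      constructor
      · simp only [pvT, pvMerge]
        rw [h10, h11]
        omega
      · simp only [pvT, pvMerge]
        rw [h10, h11]
        omega

theorem pvB_eq (arr : List Int) (h : arr ≠ []) :
    maxi_indexes_alt arr
      = max (pvXY arr (arr.length - 1)).1 (pvXY arr (arr.length - 1)).2 := by
  unfold maxi_indexes_alt
  rw [if_neg h, pvSolve_eq_pvT arr h, (pvT_inv arr h).2]

-- ===== VERDICT (by name: the statement is the Claim_ definition above) =====
theorem maxi_indexes_spec : Claim_equal_maxi_indexes := by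
  intro arr _ hpre
  unfold Spec_maxi_indexes
  rw [pvA_eq arr hpre, pvB_eq arr hpre]
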